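-- pv_equiv track=rewrite | github.com/benallard/advent | 2025/day1.py | countCross0
-- ===== SOURCE A (Python) =====
-- def is0(start, steps, dir):
--     return start + dir * steps == 0
--
-- def countCross0(start, steps, dir):
--     count = 0
--     for step in range(1, steps + 1):
--         pos = start + dir * step
--         if pos % 100 == 0:
--             count += 1
--     # Make sure to subtract the case where we stop on 0
--     if is0(start, steps, dir):
--         count -= 1
--     return count
-- ===== SOURCE B (Python) =====
-- def countCross0(start, steps, dir):
--     # Positions repeat mod 100 with period 100 in the step index, so count one
--     # full period once and multiply, plus the partial remainder period: O(1)
--     # instead of O(steps).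
--     count = 0
--     if steps > 0:
--         q, r = divmod(steps, 100)
--         full = sum(1 for s in range(1, 101) if (start + dir * s) % 100 == 0)
--         rest = sum(1 for s in range(1, r + 1) if (start + dir * s) % 100 == 0)
--         count = q * full + rest
--     if start + dir * steps == 0:
--         count -= 1
--     return count
-- ===== Notes on version B (the rewrite author's own statement) =====
-- stated objective: faster
-- what changed: Replaces the O(steps) scan of every step with a closed-form periodicity argument: hits in one 100-step period are counted once and multiplied by steps//100, plus a scan of the steps%100 remainder.
import Mathlib
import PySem

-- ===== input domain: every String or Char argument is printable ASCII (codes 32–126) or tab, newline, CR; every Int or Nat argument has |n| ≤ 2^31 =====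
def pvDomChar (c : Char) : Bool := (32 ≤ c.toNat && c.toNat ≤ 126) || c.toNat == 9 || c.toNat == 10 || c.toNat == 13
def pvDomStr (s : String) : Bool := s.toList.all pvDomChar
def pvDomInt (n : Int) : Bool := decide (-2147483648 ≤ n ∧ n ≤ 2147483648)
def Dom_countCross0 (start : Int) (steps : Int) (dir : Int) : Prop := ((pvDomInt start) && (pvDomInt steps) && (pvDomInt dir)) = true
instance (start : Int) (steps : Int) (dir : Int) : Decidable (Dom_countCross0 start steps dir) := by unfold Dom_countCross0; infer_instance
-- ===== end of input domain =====

-- B replaces the O(steps) per-step scan by counting one 100-step period and multiplying by steps // 100 (faster, asymptotic).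


-- ===== PORT A =====
def is0 (start : Int) (steps : Int) (dir : Int) : Bool := start + dir * steps == 0

def countCross0 (start : Int) (steps : Int) (dir : Int) : Int :=
  let count := (PySem.List.pyRange 1 (steps + 1) 1).foldl
    (fun count step => if PySem.Int.mod (start + dir * step) 100 = 0 then count + 1 else count) 0
  if is0 start steps dir then count - 1 else count

-- ===== PORT B =====
-- sum(1 for s in range(1, n+1) if cond(s))
def countHits (start : Int) (dir : Int) (n : Int) : Int :=
  ((PySem.List.pyRange 1 (n + 1) 1).map
    (fun s => if PySem.Int.mod (start + dir * s) 100 = 0 then (1 : Int) else 0)).sum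

def countCross0_alt (start : Int) (steps : Int) (dir : Int) : Int :=
  let count :=
    if steps > 0 then
      let q := PySem.Int.floordiv steps 100
      let r := PySem.Int.mod steps 100
      q * countHits start dir 100 + countHits start dir r
    else 0
  if start + dir * steps = 0 then count - 1 else count

-- ===== PRECONDITION & SPEC =====
def Spec_countCross0 (start : Int) (steps : Int) (dir : Int) (out : Int) : Prop := out = countCross0_alt start steps dir
instance (start : Int) (steps : Int) (dir : Int) (out : Int) : Decidable (Spec_countCross0 start steps dir out) := by unfold Spec_countCross0; infer_instance

-- ===== CLAIM (what is proved, stated in full; the proofs are below) =====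
def Claim_equal_countCross0 : Prop := ∀ (start : Int) (steps : Int) (dir : Int), Dom_countCross0 start steps dir → Spec_countCross0 start steps dir (countCross0 start steps dir)

-- ===== LEMMAS AND PROOFS =====

-- Reference count: hits among steps 1..n
def F (start : Int) (dir : Int) : Nat → Int
  | 0 => 0
  | n + 1 => F start dir n + (if PySem.Int.mod (start + dir * (n + 1)) 100 = 0 then 1 else 0)

theorem hit_shift (start dir s : Int) :
    PySem.Int.mod (start + dir * (s + 100)) 100 = PySem.Int.mod (start + dir * s) 100 := by
  rw [PySem.Int.mod_eq_emod_of_pos (by norm_num), PySem.Int.mod_eq_emod_of_pos (by norm_num)]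
  have : start + dir * (s + 100) = (start + dir * s) + 100 * dir := by ring
  rw [this, Int.add_mul_emod_self_left]

theorem foldl_eq_F (start dir : Int) (n : Nat) (c : Int) :
    (PySem.List.pyRange 1 ((n : Int) + 1) 1).foldl
      (fun count step => if PySem.Int.mod (start + dir * step) 100 = 0 then count + 1 else count) c
    = c + F start dir n := by
  induction n generalizing c with
  | zero =>
    have h0 : ((0 : Nat) : Int) + 1 = 1 := by norm_num
    rw [h0, PySem.List.pyRange_one_eq_nil (le_refl 1)]
    simp [F]
  | succ m ih =>
    have h1 : ((m + 1 : Nat) : Int) + 1 = ((m : Int) + 1) + 1 := by push_cast; ring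
    rw [h1, PySem.List.pyRange_one_succ_right (by omega)]
    rw [List.foldl_append, ih]
    simp only [List.foldl_cons, List.foldl_nil, F]
    split <;> ring

theorem hits_eq_F (start dir : Int) (n : Nat) :
    countHits start dir (n : Int) = F start dir n := by
  unfold countHits
  induction n with
  | zero =>
    have h0 : ((0 : Nat) : Int) + 1 = 1 := by norm_num
    rw [h0, PySem.List.pyRange_one_eq_nil (le_refl 1)]
    simp [F]
  | succ m ih =>
    have h1 : ((m + 1 : Nat) : Int) + 1 = ((m : Int) + 1) + 1 := by push_cast; ring
    rw [h1, PySem.List.pyRange_one_succ_right (by omega)]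
    rw [List.map_append, List.sum_append, ih]
    simp only [List.map_cons, List.map_nil, List.sum_cons, List.sum_nil, F]
    split <;> ring

theorem F_succ (start dir : Int) (n : Nat) :
    F start dir (n + 1)
    = F start dir n + (if PySem.Int.mod (start + dir * ((n : Int) + 1)) 100 = 0 then 1 else 0) :=
  rfl

theorem F_add_100 (start dir : Int) (m : Nat) :
    F start dir (m + 100) = F start dir 100 + F start dir m := by
  induction m with
  | zero => rw [Nat.zero_add, show F start dir 0 = 0 from rfl]; ring
  | succ k ih =>
    have h1 : k + 1 + 100 = (k + 100) + 1 := by omega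
    rw [h1, F_succ start dir (k + 100), F_succ start dir k, ih]
    push_cast
    rw [show start + dir * ((k : Int) + 100 + 1) = start + dir * (((k : Int) + 1) + 100) from by
          ring,
        hit_shift]
    ring

theorem F_period (start dir : Int) (q r : Nat) :
    F start dir (100 * q + r) = (q : Int) * F start dir 100 + F start dir r := by
  induction q with
  | zero =>
    have h0 : 100 * 0 + r = r := by omega
    rw [h0]; push_cast; ring
  | succ k ih =>
    have h1 : 100 * (k + 1) + r = (100 * k + r) + 100 := by omega
    rw [h1, F_add_100, ih]
    push_cast; ring

-- ===== VERDICT (by name: the statement is the Claim_ definition above) =====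
theorem countCross0_spec : Claim_equal_countCross0 := by
  intro start steps dir _
  unfold Spec_countCross0 countCross0 countCross0_alt
  have key : (PySem.List.pyRange 1 (steps + 1) 1).foldl
      (fun count step => if PySem.Int.mod (start + dir * step) 100 = 0 then count + 1 else count) 0
      = if steps > 0 then
          PySem.Int.floordiv steps 100 * countHits start dir 100 +
            countHits start dir (PySem.Int.mod steps 100)
        else 0 := by
    by_cases hpos : steps > 0
    · simp only [hpos, if_pos]
      set q := PySem.Int.floordiv steps 100 with hq
      set r := PySem.Int.mod steps 100 with hr
      have hq0 : 0 ≤ q := by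
        rw [hq, PySem.Int.floordiv_eq_ediv_of_pos (by norm_num)]
        exact Int.ediv_nonneg (by omega) (by norm_num)
      have hr0 : 0 ≤ r := PySem.Int.mod_nonneg _ (by norm_num)
      have hrlt : r < 100 := PySem.Int.mod_lt _ (by norm_num)
      have hdecomp : q * 100 + r = steps := by
        rw [hq, hr]; exact PySem.Int.floordiv_mul_add_mod steps 100
      have hsn : steps = ((100 * q.toNat + r.toNat : Nat) : Int) := by push_cast; omega
      rw [hsn, foldl_eq_F, F_period]
      have h100 : countHits start dir 100 = F start dir 100 := by
        have := hits_eq_F start dir 100; simpa using this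
      have hrF : countHits start dir r = F start dir r.toNat := by
        have := hits_eq_F start dir r.toNat
        rwa [Int.toNat_of_nonneg hr0] at this
      rw [h100, hrF]
      have : (q.toNat : Int) = q := Int.toNat_of_nonneg hq0
      rw [this]; ring
    · simp only [hpos, if_neg, not_false_iff]
      rw [PySem.List.pyRange_one_eq_nil (by omega)]
      rfl
  rw [key]
  unfold is0
  by_cases h : start + dir * steps = 0 <;> simp [h]
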